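-- pv_equiv track=rewrite | github.com/gmferise/icpc-molecules-challenge | molecules.py | process_chain_sets
-- ===== SOURCE A (Python) =====
-- ChainSet = tuple[str, str, str, str]
--
-- ChainConfig = tuple[int, int, int, int, int, int]
--
-- Molecule = tuple[ChainSet, ChainConfig]
--
-- def process_chain_sets(chain_sets: list[ChainSet]) -> list[int]:
--     """
--     Take a list of chain sets and find the maximum area of
--     the optimal molecule made with those chain sets
--     """
--     results = []
--     for chains in chain_sets:
--         molecules = generate_molecules(chains)
--         if not molecules:  # can't assemble the chains
--             results.append(0)
--         else:
--             configs = [config for chains, config in molecules]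
--             best = max(configs, key=calc_config_area)
--             results.append(calc_config_area(best))
--     return results
--
-- def generate_molecules(chains: ChainSet) -> list[Molecule]:
--     """
--     Generate all possible Molecules from a ChainSet.
--     Will re-order the ChainSet to check all rotations.
--     """
--     # Which chain belongs in which of the 4 spots? Get all the combos
--     chain_combinations = [
--         tuple(chains[i] for i in c)
--         for c in combinations(range(4))
--     ]
--     all_configs = []
--     for combo in chain_combinations:
--         for config in generate_valid_configs(combo):
--             all_configs.append((combo, config))
--     return all_configs
--
-- def generate_valid_configs(chains: ChainSet) -> list[ChainConfig]:
--     """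
--     Generate all valid ChainConfigs from an ordered ChainSet
--     """
--     A, B, C, D = chains
--     # Generate valid octothorpes, but the intersections may not match
--     return [                                          # Ex for len 12
--         (Ae, Bs, Be, Cs, Ce, Ds)
--         for Ae in range(3, len(A) - 1)                # [3,          10]
--         for Bs in range(1, len(B) - 3)                # [1,           8]
--         for Be in range(Bs + 2, len(B) - 1)           # [(3, 10),    10]
--         for Cs in range(3, len(C) - 1)                # [3,          10]
--         for Ce in range(max(1, Cs - Ae + 1), Cs - 2)  # [(1, 8), (1, 8)]
--         for Ds in range(1 + (Be - Bs), len(D) - 1)    # [(3, 10),    10]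
--         if (  # Narrow down by checking intersections
--             A[Ae] == B[Bs]
--             and B[Be] == C[Cs]
--             and C[Ce] == D[Ds]
--             and D[Ds - (Be - Bs)] == A[Ae - (Cs - Ce)]
--         )
--     ]
--
-- def calc_config_area(config: ChainConfig) -> int:
--     """
--     Calculate the inner area of a given configuration
--     """
--     Ae, Bs, Be, Cs, Ce, Ds = config
--     width = Cs - Ce
--     height = Be - Bs
--     return (width - 1) * (height - 1)
--
-- def recursive_combogen(choices: list, acc=()) -> list:
--     """
--     Generate tuple combinations using recursion.
--     End result will be deeply nested.
--     """
--     if len(choices) == 1: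
--         return acc + tuple(choices)
--     else:
--         return [recursive_combogen(
--             [item for item in choices if item != c],
--             acc + (c,)
--         ) for c in choices]
--
-- def recursive_flatten(a_list: list) -> list:
--     """
--     Recursively flatten any list
--     """
--     flat = []
--     for c in a_list:
--         if type(c) == list:
--             flat += recursive_flatten(c)
--         else:
--             flat.append(c)
--     return flat
--
-- def combinations(choices: list) -> list:
--     """
--     Calculate the possible combinations from
--     the given (unique) items.
--     """
--     return recursive_flatten(recursive_combogen(choices))
-- ===== SOURCE B (Python) =====
-- def process_chain_sets(chain_sets):
--     """
--     For each chain set, the answer only depends on the maximum inner area, so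
--     instead of materialising every valid 6-tuple configuration we run, per
--     permutation of the four chains, a loop over (Bs, Be, Cs, Ce) and decide by
--     an existence test (with a precomputed set of character pairs of D) whether
--     some (Ae, Ds) completes it, keeping a running maximum.
--     """
--     perms = [(i, j, k, l)
--              for i in range(4) for j in range(4) for k in range(4) for l in range(4)
--              if j != i and k != i and k != j and l != i and l != j and l != k]
--     results = []
--     for chains in chain_sets:
--         best = 0
--         for (i, j, k, l) in perms:
--             A, B, C, D = chains[i], chains[j], chains[k], chains[l]
--             nA, nB, nC, nD = len(A), len(B), len(C), len(D)
--             for bs in range(1, nB - 3):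
--                 for be in range(bs + 2, nB - 1):
--                     h = be - bs
--                     pd = {(D[ds], D[ds - h]) for ds in range(1 + h, nD - 1)}
--                     for cs in range(3, nC - 1):
--                         if C[cs] != B[be]:
--                             continue
--                         for ce in range(1, cs - 2):
--                             w = cs - ce
--                             area = (w - 1) * (h - 1)
--                             if area > best and any(
--                                 A[ae] == B[bs] and (C[ce], A[ae - w]) in pd
--                                 for ae in range(max(3, w + 1), nA - 1)
--                             ):
--                                 best = area
--         results.append(best)
--     return results
-- ===== Notes on version B (the rewrite author's own statement) =====
-- stated objective: faster
-- what changed: Instead of materialising all valid 6-tuple configurations per permutation and taking max-by-area afterwards, B keeps a running maximum over (Bs,Be,Cs,Ce) quadruples and replaces the two inner loops by an existence test over Ae driven by a precomputed set of (D[ds],D[ds-h]) character pairs, pruning by the B[be]==C[cs] check and by area>best.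
import Mathlib
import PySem

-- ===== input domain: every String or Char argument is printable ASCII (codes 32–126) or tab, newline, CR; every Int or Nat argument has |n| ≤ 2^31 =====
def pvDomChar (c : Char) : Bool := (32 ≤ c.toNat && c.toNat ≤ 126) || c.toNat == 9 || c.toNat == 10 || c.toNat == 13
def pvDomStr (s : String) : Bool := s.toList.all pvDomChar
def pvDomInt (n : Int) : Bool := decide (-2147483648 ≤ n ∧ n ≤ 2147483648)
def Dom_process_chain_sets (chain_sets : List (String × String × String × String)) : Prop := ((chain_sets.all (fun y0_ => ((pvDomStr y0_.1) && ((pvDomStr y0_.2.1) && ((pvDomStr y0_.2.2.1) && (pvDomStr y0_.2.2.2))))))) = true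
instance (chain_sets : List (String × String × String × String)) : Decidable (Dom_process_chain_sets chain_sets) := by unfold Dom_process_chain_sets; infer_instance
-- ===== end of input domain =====

-- B replaces A's exhaustive 6-nested-loop enumeration of all valid configurations (max-by-area
-- afterwards) by a running maximum over (Bs,Be,Cs,Ce) with a set-driven existence test for (Ae,Ds);
-- objective: faster (measurably so on the generated inputs).

-- ===== PORT A =====

-- the nested list/tuple structure recursive_combogen builds (tuples at the leaves);
-- a mutual pair instead of a nested inductive
mutual
inductive PvNested where
  | tup (t : List Int) : PvNested
  | lst (l : PvNestedList) : PvNested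
deriving DecidableEq
inductive PvNestedList where
  | nil : PvNestedList
  | cons (h : PvNested) (t : PvNestedList) : PvNestedList
deriving DecidableEq
end

-- the list comprehension '[recursive_combogen([item for item in choices if item != c], acc + (c,)) for c in choices]'
def pvMapCombogen (g : List Int → List Int → PvNested) (choices : List Int) (acc : List Int) : List Int → PvNestedList
  | [] => .nil
  | c :: rest => .cons (g (choices.filter (fun x => !(x == c))) (acc ++ [c])) (pvMapCombogen g choices acc rest)

-- recursive_combogen, with a fuel argument for totality (fuel = len(choices) at the call site;
-- each recursive call strictly shrinks the choice list, so fuel is never exhausted)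
def pvCombogen : Nat → List Int → List Int → PvNested
  | 0, _, _ => .lst .nil
  | f + 1, choices, acc =>
    if choices.length == 1 then .tup (acc ++ choices)
    else .lst (pvMapCombogen (fun ch ac => pvCombogen f ch ac) choices acc choices)

-- recursive_flatten ('flat += recursive_flatten(c)' / 'flat.append(c)')
mutual
def pvFlatten : PvNested → List (List Int)
  | .tup t => [t]
  | .lst l => pvFlattenL l []
def pvFlattenL : PvNestedList → List (List Int) → List (List Int)
  | .nil, acc => acc
  | .cons c rest, acc => pvFlattenL rest (acc ++ pvFlatten c)
end

def pvCombinations (choices : List Int) : List (List Int) :=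
  pvFlatten (pvCombogen choices.length choices [])

-- s[i]; exact here: every index either program uses lies in range
def pvCh (s : List Char) (i : Int) : Char := (PySem.List.pyGet? s i).getD ' '

-- chains[i]; exact for i ∈ {0,1,2,3}, the only indices combinations(range(4)) produces
def pvGetChain (chains : String × String × String × String) (i : Int) : String :=
  if i == 0 then chains.1 else if i == 1 then chains.2.1 else if i == 2 then chains.2.2.1 else chains.2.2.2

-- tuple(chains[i] for i in c); exact: every combination c has length 4
def pvSelect (chains : String × String × String × String) (c : List Int) : String × String × String × String :=
  (pvGetChain chains (PySem.List.pyGetD c 0 0),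
   pvGetChain chains (PySem.List.pyGetD c 1 0),
   pvGetChain chains (PySem.List.pyGetD c 2 0),
   pvGetChain chains (PySem.List.pyGetD c 3 0))

-- generate_valid_configs
def pvGVC (t : String × String × String × String) : List (Int × Int × Int × Int × Int × Int) :=
  let A := t.1.toList
  let B := t.2.1.toList
  let C := t.2.2.1.toList
  let D := t.2.2.2.toList
  (PySem.List.pyRange 3 (PySem.Chars.len A - 1) 1).flatMap (fun Ae =>
  (PySem.List.pyRange 1 (PySem.Chars.len B - 3) 1).flatMap (fun Bs =>
  (PySem.List.pyRange (Bs + 2) (PySem.Chars.len B - 1) 1).flatMap (fun Be =>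
  (PySem.List.pyRange 3 (PySem.Chars.len C - 1) 1).flatMap (fun Cs =>
  (PySem.List.pyRange (max 1 (Cs - Ae + 1)) (Cs - 2) 1).flatMap (fun Ce =>
  ((PySem.List.pyRange (1 + (Be - Bs)) (PySem.Chars.len D - 1) 1).filter (fun Ds =>
      pvCh A Ae == pvCh B Bs && pvCh B Be == pvCh C Cs && pvCh C Ce == pvCh D Ds &&
      pvCh D (Ds - (Be - Bs)) == pvCh A (Ae - (Cs - Ce)))).map (fun Ds =>
    (Ae, Bs, Be, Cs, Ce, Ds)))))))

-- calc_config_area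
def pvCalcArea : Int × Int × Int × Int × Int × Int → Int
  | (_, Bs, Be, Cs, Ce, _) => (Cs - Ce - 1) * (Be - Bs - 1)

-- generate_molecules
def pvGenerateMolecules (chains : String × String × String × String) :
    List ((String × String × String × String) × (Int × Int × Int × Int × Int × Int)) :=
  let chain_combinations := (pvCombinations (PySem.List.pyRange 0 4 1)).map (fun c => pvSelect chains c)
  chain_combinations.foldl (fun all_configs combo =>
    (pvGVC combo).foldl (fun acc config => acc ++ [(combo, config)]) all_configs) []

def process_chain_sets (chain_sets : List (String × String × String × String)) : List Int :=
  chain_sets.foldl (fun results chains =>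
    let molecules := pvGenerateMolecules chains
    results ++ [if molecules.isEmpty then 0
      else
        let configs := molecules.map (fun m => m.2)
        -- the 'none' branch is unreachable: configs is nonempty whenever molecules is,
        -- so Python's max is never called on an empty list here
        match PySem.List.max? configs pvCalcArea with
        | some best => pvCalcArea best
        | none => 0]) []

-- ===== PORT B =====

-- the permutation comprehension of Source B
def pvPerms : List (Int × Int × Int × Int) :=
  (PySem.List.pyRange 0 4 1).flatMap (fun i =>
  (PySem.List.pyRange 0 4 1).flatMap (fun j =>
  (PySem.List.pyRange 0 4 1).flatMap (fun k =>
  (PySem.List.pyRange 0 4 1).flatMap (fun l =>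
    if !(j == i) && !(k == i) && !(k == j) && !(l == i) && !(l == j) && !(l == k)
    then [(i, j, k, l)] else []))))

-- the body of Source B's per-permutation loop nest (running maximum 'best')
def pvBestChains (best0 : Int) (A B C D : String) : Int :=
  let a := A.toList
  let b := B.toList
  let c := C.toList
  let d := D.toList
  (PySem.List.pyRange 1 (PySem.Chars.len b - 3) 1).foldl (fun best bs =>
    (PySem.List.pyRange (bs + 2) (PySem.Chars.len b - 1) 1).foldl (fun best be =>
      let h := be - bs
      let pd := PySem.Set.ofList ((PySem.List.pyRange (1 + h) (PySem.Chars.len d - 1) 1).map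
        (fun ds => (pvCh d ds, pvCh d (ds - h))))
      (PySem.List.pyRange 3 (PySem.Chars.len c - 1) 1).foldl (fun best cs =>
        if !(pvCh c cs == pvCh b be) then best    -- 'continue'
        else
          (PySem.List.pyRange 1 (cs - 2) 1).foldl (fun best ce =>
            let w := cs - ce
            let area := (w - 1) * (h - 1)
            if decide (best < area) &&
                ((PySem.List.pyRange (max 3 (w + 1)) (PySem.Chars.len a - 1) 1).any (fun ae =>
                  pvCh a ae == pvCh b bs &&
                  PySem.Set.contains pd (pvCh c ce, pvCh a (ae - w))))
            then area else best) best) best) best) best0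

def process_chain_sets_alt (chain_sets : List (String × String × String × String)) : List Int :=
  let perms := pvPerms
  chain_sets.foldl (fun results chains =>
    results ++ [perms.foldl (fun best p =>
      pvBestChains best (pvGetChain chains p.1) (pvGetChain chains p.2.1)
        (pvGetChain chains p.2.2.1) (pvGetChain chains p.2.2.2)) 0]) []

-- ===== PRECONDITION & SPEC =====
def Spec_process_chain_sets (chain_sets : List (String × String × String × String)) (out : List Int) : Prop := out = process_chain_sets_alt chain_sets
instance (chain_sets : List (String × String × String × String)) (out : List Int) : Decidable (Spec_process_chain_sets chain_sets out) := by unfold Spec_process_chain_sets; infer_instance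

-- ===== CLAIM (what is proved, stated in full; the proofs are below) =====
def Claim_equal_process_chain_sets : Prop := ∀ (chain_sets : List (String × String × String × String)), Dom_process_chain_sets chain_sets → Spec_process_chain_sets chain_sets (process_chain_sets chain_sets)

-- ===== LEMMAS AND PROOFS =====

-- B's per-permutation candidate areas, as a plain list (proof-side device)
def pvGB (t : String × String × String × String) : List Int :=
  let a := t.1.toList
  let b := t.2.1.toList
  let c := t.2.2.1.toList
  let d := t.2.2.2.toList
  (PySem.List.pyRange 1 (PySem.Chars.len b - 3) 1).flatMap (fun bs =>
  (PySem.List.pyRange (bs + 2) (PySem.Chars.len b - 1) 1).flatMap (fun be =>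
  (PySem.List.pyRange 3 (PySem.Chars.len c - 1) 1).flatMap (fun cs =>
    if !(pvCh c cs == pvCh b be) then []
    else ((PySem.List.pyRange 1 (cs - 2) 1).filter (fun ce =>
        (PySem.List.pyRange (max 3 (cs - ce + 1)) (PySem.Chars.len a - 1) 1).any (fun ae =>
          pvCh a ae == pvCh b bs &&
          PySem.Set.contains (PySem.Set.ofList ((PySem.List.pyRange (1 + (be - bs)) (PySem.Chars.len d - 1) 1).map
            (fun ds => (pvCh d ds, pvCh d (ds - (be - bs))))))
            (pvCh c ce, pvCh a (ae - (cs - ce)))))).map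
      (fun ce => (cs - ce - 1) * (be - bs - 1)))))

lemma pv_if_max (best area : Int) (c : Bool) :
    (if (decide (best < area) && c) = true then area else best)
      = (if c = true then max best area else best) := by
  cases c <;> simp
  omega

lemma pv_foldl_max_if {α : Type} (p : α → Bool) (f : α → Int) :
    ∀ (l : List α) (a : Int),
      l.foldl (fun acc x => if p x = true then max acc (f x) else acc) a
        = ((l.filter p).map f).foldl max a := by
  intro l
  induction l with
  | nil => intro a; simp
  | cons hd tl ih =>
    intro a
    by_cases h : p hd = true <;> simp [h, ih]

lemma pv_ite_foldl_max (c : Bool) (L : List Int) (a : Int) :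
    (if c = true then a else L.foldl max a) = ((if c = true then [] else L).foldl max a) := by
  cases c <;> simp

lemma pv_foldl_max_congr (l1 l2 : List Int) (a : Int) (h : ∀ x, x ∈ l1 ↔ x ∈ l2) :
    l1.foldl max a = l2.foldl max a := by
  apply le_antisymm
  · rcases PySem.List.foldl_max_mem l1 a with h1 | h1
    · rw [h1]; exact (PySem.List.le_foldl_max l2 a).1
    · exact (PySem.List.le_foldl_max l2 a).2 _ ((h _).mp h1)
  · rcases PySem.List.foldl_max_mem l2 a with h1 | h1
    · rw [h1]; exact (PySem.List.le_foldl_max l1 a).1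
    · exact (PySem.List.le_foldl_max l1 a).2 _ ((h _).mpr h1)

lemma pv_combosLit : pvCombinations (PySem.List.pyRange 0 4 1) =
    [[0,1,2,3],[0,1,3,2],[0,2,1,3],[0,2,3,1],[0,3,1,2],[0,3,2,1],
     [1,0,2,3],[1,0,3,2],[1,2,0,3],[1,2,3,0],[1,3,0,2],[1,3,2,0],
     [2,0,1,3],[2,0,3,1],[2,1,0,3],[2,1,3,0],[2,3,0,1],[2,3,1,0],
     [3,0,1,2],[3,0,2,1],[3,1,0,2],[3,1,2,0],[3,2,0,1],[3,2,1,0]] := by decide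

lemma pv_permsLit : pvPerms =
    [(0,1,2,3),(0,1,3,2),(0,2,1,3),(0,2,3,1),(0,3,1,2),(0,3,2,1),
     (1,0,2,3),(1,0,3,2),(1,2,0,3),(1,2,3,0),(1,3,0,2),(1,3,2,0),
     (2,0,1,3),(2,0,3,1),(2,1,0,3),(2,1,3,0),(2,3,0,1),(2,3,1,0),
     (3,0,1,2),(3,0,2,1),(3,1,0,2),(3,1,2,0),(3,2,0,1),(3,2,1,0)] := by decide

lemma pv_tuplesEq (chains : String × String × String × String) :
    (pvCombinations (PySem.List.pyRange 0 4 1)).map (pvSelect chains)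
      = pvPerms.map (fun p => (pvGetChain chains p.1, pvGetChain chains p.2.1,
          pvGetChain chains p.2.2.1, pvGetChain chains p.2.2.2)) := by
  rw [pv_combosLit, pv_permsLit]
  rfl

lemma pv_area_nonneg (t : String × String × String × String) :
    ∀ x ∈ pvGVC t, 0 ≤ pvCalcArea x := by
  intro x hx
  simp only [pvGVC, List.mem_flatMap, List.mem_map, List.mem_filter,
    PySem.List.mem_pyRange_one] at hx
  obtain ⟨Ae, hAe, Bs, hBs, Be, hBe, Cs, hCs, Ce, hCe, Ds, ⟨hDs, -⟩, rfl⟩ := hx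
  simp only [pvCalcArea]
  have h1 : (0:Int) ≤ Cs - Ce - 1 := by omega
  have h2 : (0:Int) ≤ Be - Bs - 1 := by omega
  exact mul_nonneg h1 h2

lemma pv_maxKey (l : List (Int × Int × Int × Int × Int × Int))
    (h : ∀ x ∈ l, 0 ≤ pvCalcArea x) :
    (match PySem.List.max? l pvCalcArea with
     | some best => pvCalcArea best
     | none => 0) = (l.map pvCalcArea).foldl max 0 := by
  cases hm : PySem.List.max? l pvCalcArea with
  | none =>
    have : l = [] := (PySem.List.max?_eq_none_iff l pvCalcArea).mp hm
    subst this; simp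
  | some m =>
    have hmem : m ∈ l := PySem.List.max?_mem hm
    have hmax := PySem.List.max?_isMax hm
    simp only
    apply le_antisymm
    · exact (PySem.List.le_foldl_max _ _).2 _ (List.mem_map_of_mem hmem)
    · rcases PySem.List.foldl_max_mem (l.map pvCalcArea) 0 with h0 | hx
      · rw [h0]; exact h m hmem
      · obtain ⟨y, hy, hyeq⟩ := List.mem_map.mp hx
        rw [← hyeq]; exact hmax y hy

lemma pv_molecules_gen (combos : List (String × String × String × String)) :
    combos.foldl (fun all_configs combo =>
        (pvGVC combo).foldl (fun acc config => acc ++ [(combo, config)]) all_configs) []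
      = combos.flatMap (fun combo => (pvGVC combo).map (fun cfg => (combo, cfg))) := by
  simp only [PySem.List.foldl_append_singleton_eq_map, PySem.List.foldl_append_eq_flatMap,
    List.nil_append]

lemma pv_molecules (chains : String × String × String × String) :
    pvGenerateMolecules chains
      = ((pvCombinations (PySem.List.pyRange 0 4 1)).map (pvSelect chains)).flatMap
          (fun combo => (pvGVC combo).map (fun cfg => (combo, cfg))) := by
  unfold pvGenerateMolecules
  exact pv_molecules_gen _

lemma pv_bestChains_char (best0 : Int) (A B C D : String) :
    pvBestChains best0 A B C D = (pvGB (A, B, C, D)).foldl max best0 := by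
  unfold pvBestChains pvGB
  simp only [pv_if_max]
  simp only [pv_foldl_max_if]
  simp only [pv_ite_foldl_max]
  simp only [← List.foldl_flatMap]

lemma pv_mem_ite_nil {α : Type} (c : Bool) (L : List α) (a : α) :
    a ∈ (if c = true then ([] : List α) else L) ↔ c = false ∧ a ∈ L := by
  cases c <;> simp

lemma pv_core (t : String × String × String × String) (x : Int) :
    x ∈ (pvGVC t).map pvCalcArea ↔ x ∈ pvGB t := by
  obtain ⟨S1, S2, S3, S4⟩ := t
  simp only [pvGVC, pvGB, pvCalcArea, List.mem_map, List.mem_flatMap, List.mem_filter,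
    PySem.List.mem_pyRange_one, List.any_eq_true, Bool.and_eq_true, beq_iff_eq,
    PySem.Set.contains_iff, PySem.Set.mem_ofList, Prod.mk.injEq,
    pv_mem_ite_nil, Bool.not_eq_false']
  constructor
  · rintro ⟨a, ⟨Ae, hAe, Bs, hBs, Be, hBe, Cs, hCs, Ce, hCe, Ds, ⟨hDs, ⟨⟨e1, e2⟩, e3⟩, e4⟩, ha⟩, hx⟩
    subst ha
    refine ⟨Bs, hBs, Be, hBe, Cs, hCs, e2.symm, Ce, ⟨⟨by omega, by omega⟩,
      Ae, ⟨by omega, by omega⟩, e1, Ds, ⟨by omega, by omega⟩, e3.symm, e4⟩, hx⟩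
  · rintro ⟨Bs, hBs, Be, hBe, Cs, hCs, hbc, Ce, ⟨hCe, Ae, hAe, e1, Ds, hDs, e3, e4⟩, hx⟩
    exact ⟨(Ae, Bs, Be, Cs, Ce, Ds),
      ⟨Ae, ⟨by omega, by omega⟩, Bs, hBs, Be, hBe, Cs, hCs, Ce, ⟨by omega, by omega⟩, Ds,
        ⟨⟨by omega, by omega⟩, ⟨⟨e1, hbc.symm⟩, e3.symm⟩, e4⟩, rfl⟩, hx⟩

-- ===== VERDICT (by name: the statement is the Claim_ definition above) =====
theorem process_chain_sets_spec : Claim_equal_process_chain_sets := by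
  unfold Claim_equal_process_chain_sets Spec_process_chain_sets
  intro cs _
  unfold process_chain_sets process_chain_sets_alt
  simp only [PySem.List.foldl_append_singleton_eq_map, List.nil_append]
  refine List.map_congr_left (fun chains _ => ?_)
  rw [pv_molecules chains]
  have hcfg : (((pvCombinations (PySem.List.pyRange 0 4 1)).map (pvSelect chains)).flatMap
        (fun combo => (pvGVC combo).map (fun cfg => (combo, cfg)))).map (fun m => m.2)
      = ((pvCombinations (PySem.List.pyRange 0 4 1)).map (pvSelect chains)).flatMap pvGVC := by
    simp [List.map_flatMap, List.map_map]
  have hnn : ∀ x ∈ ((pvCombinations (PySem.List.pyRange 0 4 1)).map (pvSelect chains)).flatMap pvGVC,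
      0 ≤ pvCalcArea x := by
    intro x hx
    obtain ⟨t, -, hxt⟩ := List.mem_flatMap.mp hx
    exact pv_area_nonneg t x hxt
  have hAside : (if (((pvCombinations (PySem.List.pyRange 0 4 1)).map (pvSelect chains)).flatMap
        (fun combo => (pvGVC combo).map (fun cfg => (combo, cfg)))).isEmpty = true then (0:Int)
      else
        match PySem.List.max? ((((pvCombinations (PySem.List.pyRange 0 4 1)).map (pvSelect chains)).flatMap
            (fun combo => (pvGVC combo).map (fun cfg => (combo, cfg)))).map (fun m => m.2)) pvCalcArea with
        | some best => pvCalcArea best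
        | none => 0)
      = (((((pvCombinations (PySem.List.pyRange 0 4 1)).map (pvSelect chains)).flatMap pvGVC).map
          pvCalcArea)).foldl max 0 := by
    rw [hcfg]
    by_cases h : ((pvCombinations (PySem.List.pyRange 0 4 1)).map (pvSelect chains)).flatMap pvGVC = []
    · rw [if_pos (by rw [List.isEmpty_iff]; exact List.map_eq_nil_iff.mp (hcfg.trans h))]
      rw [h]; simp
    · rw [if_neg (by rw [List.isEmpty_iff]; intro hM; exact h (by rw [← hcfg, hM]; simp))]
      exact pv_maxKey _ hnn
  rw [hAside]
  simp only [pv_bestChains_char]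
  rw [← List.foldl_flatMap]
  apply pv_foldl_max_congr
  intro x
  rw [List.map_flatMap, pv_tuplesEq chains]
  simp only [List.mem_flatMap, List.mem_map]
  constructor
  · rintro ⟨t, ⟨p, hp, rfl⟩, hx⟩
    exact ⟨p, hp, (pv_core _ x).mp (List.mem_map.mpr hx)⟩
  · rintro ⟨p, hp, hx⟩
    exact ⟨_, ⟨p, hp, rfl⟩, List.mem_map.mp ((pv_core _ x).mpr hx)⟩
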